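-- pv_equiv track=rewrite | github.com/AbdallaElsuni/TaxiCal-Pro | App.LegacyUI.py | allow_digit_only
-- ===== SOURCE A (Python) =====
-- def allow_digit_only(user_input:str):
--     for c in user_input:
--         if not c.isdigit():
--             if c != ".":
--                 user_input = user_input.replace(c, "")
--     if user_input.find(".") >= 0:
--         first_dot = user_input.find(".")
--         if first_dot == 0:
--             user_input = "0" + user_input
--     if user_input.count(".") > 1:
--         first_dot = user_input.find(".")
--         first_portion = user_input[:first_dot+1]
--         second_portion = user_input[first_dot:]
--         second_portion = second_portion.replace(".", "")
--         user_input = first_portion + second_portion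
--     return user_input
-- ===== SOURCE B (Python) =====
-- def allow_digit_only(user_input: str):
--     out = []
--     seen_dot = False
--     for c in user_input:
--         if c.isdigit():
--             out.append(c)
--         elif c == "." and not seen_dot:
--             out.append(c)
--             seen_dot = True
--     result = "".join(out)
--     if result.startswith("."):
--         result = "0" + result
--     return result
-- ===== Notes on version B (the rewrite author's own statement) =====
-- stated objective: faster
-- what changed: B replaces A's mutate-while-iterating replace() loop plus three post-processing passes (find, count, slice/replace dot dedup) with one stateful pass keeping a seen_dot flag, then a single startswith check for the leading-dot case.
import Mathlib
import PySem

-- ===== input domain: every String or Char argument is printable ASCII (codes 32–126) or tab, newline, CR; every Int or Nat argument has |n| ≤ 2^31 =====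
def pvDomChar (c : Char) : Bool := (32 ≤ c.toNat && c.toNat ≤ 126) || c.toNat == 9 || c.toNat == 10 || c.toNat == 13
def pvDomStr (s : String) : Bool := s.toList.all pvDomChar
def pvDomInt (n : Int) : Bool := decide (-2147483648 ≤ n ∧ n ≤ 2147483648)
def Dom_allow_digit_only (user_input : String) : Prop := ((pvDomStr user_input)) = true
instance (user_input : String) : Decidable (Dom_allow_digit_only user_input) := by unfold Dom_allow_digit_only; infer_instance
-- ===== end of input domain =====

-- B replaces A's build-then-postprocess (char-by-char replace() loop, then find/prepend, then
-- count/slice/replace dot dedup) with one stateful pass keeping a seen_dot flag (same return value).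

-- ===== PORT A =====
-- literal transliteration of A on the code-point list; allow_digit_only wraps it back into String
def allowDigitOnlyACore (cs : List Char) : List Char :=
  -- for c in user_input: if not c.isdigit(): if c != ".": user_input = user_input.replace(c, "")
  let u1 := cs.foldl (fun u c =>
      if !(PySem.Chars.isdigit c) then
        (if c ≠ '.' then PySem.Chars.replace u [c] [] else u)
      else u) cs
  -- if user_input.find(".") >= 0: first_dot = …; if first_dot == 0: user_input = "0" + user_input
  let u2 := if 0 ≤ PySem.Chars.find u1 ['.'] then
      (let firstDot := PySem.Chars.find u1 ['.']
       if firstDot = 0 then '0' :: u1 else u1)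
    else u1
  -- if user_input.count(".") > 1: keep everything up to the first dot, strip dots from the rest
  if 1 < PySem.Chars.count u2 ['.'] then
    let firstDot := PySem.Chars.find u2 ['.']
    let firstPortion := PySem.Chars.slice u2 none (some (firstDot + 1))
    let secondPortion := PySem.Chars.slice u2 (some firstDot) none
    let secondPortion2 := PySem.Chars.replace secondPortion ['.'] []
    firstPortion ++ secondPortion2
  else u2

def allow_digit_only (user_input : String) : String :=
  String.ofList (allowDigitOnlyACore user_input.toList)

-- ===== PORT B =====
-- one pass: append digits; append '.' only if no dot has been seen yet
def allowDigitOnlyBStep (st : List Char × Bool) (c : Char) : List Char × Bool :=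
  if PySem.Chars.isdigit c then (st.1 ++ [c], st.2)
  else if c = '.' ∧ st.2 = false then (st.1 ++ [c], true)
  else st

def allowDigitOnlyBCore (cs : List Char) : List Char :=
  let res := (cs.foldl allowDigitOnlyBStep ([], false)).1
  if PySem.Chars.startswith res ['.'] then '0' :: res else res

def allow_digit_only_alt (user_input : String) : String :=
  String.ofList (allowDigitOnlyBCore user_input.toList)

-- ===== PRECONDITION & SPEC =====
def Spec_allow_digit_only (user_input : String) (out : String) : Prop := out = allow_digit_only_alt user_input
instance (user_input : String) (out : String) : Decidable (Spec_allow_digit_only user_input out) := by unfold Spec_allow_digit_only; infer_instance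

-- ===== CLAIM (what is proved, stated in full; the proofs are below) =====
def Claim_equal_allow_digit_only : Prop := ∀ (user_input : String), Dom_allow_digit_only user_input → Spec_allow_digit_only user_input (allow_digit_only user_input)

-- ===== LEMMAS AND PROOFS =====

theorem replace_single_go (c : Char) (l acc : List Char) (fuel : Nat) (h : l.length ≤ fuel) :
    PySem.Chars.replace.go [c] [] fuel l acc = acc.reverse ++ l.filter (· ≠ c) := by
  induction l generalizing acc fuel with
  | nil => cases fuel <;> simp [PySem.Chars.replace.go]
  | cons x t ih =>
    cases fuel with
    | zero => simp at h
    | succ n =>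
      simp only [PySem.Chars.replace.go]
      by_cases hx : c = x
      · subst hx
        simp [List.isPrefixOf, ih acc n (by simpa using h)]
      · simp [List.isPrefixOf, hx, ih (x :: acc) n (by simpa using h), Ne.symm hx]

theorem replace_single (c : Char) (s : List Char) :
    PySem.Chars.replace s [c] [] = s.filter (· ≠ c) := by
  simp [PySem.Chars.replace, replace_single_go c s [] s.length (le_refl _)]

theorem count_single_go (c : Char) (l : List Char) (acc fuel : Nat) (h : l.length ≤ fuel) :
    PySem.Chars.count.go [c] fuel l acc = acc + l.count c := by
  induction l generalizing acc fuel with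
  | nil => cases fuel <;> simp [PySem.Chars.count.go]
  | cons x t ih =>
    cases fuel with
    | zero => simp at h
    | succ n =>
      simp only [PySem.Chars.count.go]
      by_cases hx : c = x
      · subst hx
        simp [List.isPrefixOf, ih (acc+1) n (by simpa using h)]
        omega
      · simp [List.isPrefixOf, hx, ih acc n (by simpa using h), Ne.symm hx]

theorem count_single (c : Char) (s : List Char) :
    PySem.Chars.count s [c] = s.count c := by
  simp [PySem.Chars.count, count_single_go c s 0 s.length (le_refl _)]

theorem singleton_prefix_iff (c : Char) (l : List Char) :
    [c] <+: l ↔ ∃ t, l = c :: t := by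
  simp [List.cons_prefix_iff]

theorem singleton_infix_iff (c : Char) (l : List Char) :
    [c] <:+: l ↔ c ∈ l := by
  constructor
  · rintro ⟨p, q, rfl⟩; simp
  · intro h
    obtain ⟨p, q, rfl⟩ := List.append_of_mem h
    exact ⟨p, q, by simp⟩

theorem find_single_not_mem (c : Char) (s : List Char) (h : c ∉ s) :
    PySem.Chars.find s [c] = -1 := by
  rw [PySem.Chars.find_eq_neg_one_iff, singleton_infix_iff]
  exact h

theorem find_single_first (c : Char) (q r : List Char) (h : c ∉ q) :
    PySem.Chars.find (q ++ c :: r) [c] = (q.length : Int) := by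
  have hinf : [c] <:+: (q ++ c :: r) := (singleton_infix_iff c _).mpr (by simp)
  have hnn : 0 ≤ PySem.Chars.find (q ++ c :: r) [c] := (PySem.Chars.find_nonneg_iff _ _).mpr hinf
  obtain ⟨h1, h2⟩ := PySem.Chars.find_spec hnn
  set n := (PySem.Chars.find (q ++ c :: r) [c]).toNat with hn
  have hq : [c] <+: (q ++ c :: r).drop q.length := by
    rw [List.drop_left]
    exact ⟨r, rfl⟩
  have hle : n ≤ q.length := by
    by_contra hlt
    exact h2 q.length (by omega) hq
  have heq : n = q.length := by
    by_contra hne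
    have hlt : n < q.length := by omega
    obtain ⟨t, ht⟩ := (singleton_prefix_iff c _).mp h1
    have : (q ++ c :: r)[n]? = some c := by
      rw [List.getElem?_eq_some_iff]
      refine ⟨by simp; omega, ?_⟩
      have := congrArg List.head? ht
      simpa [List.head?_drop, List.getElem?_eq_getElem (by simp; omega : n < (q ++ c :: r).length)] using this
    rw [List.getElem?_append_left hlt] at this
    exact h (List.mem_of_getElem? this)
  omega

theorem loopA_go (cs s : List Char) :
    cs.foldl (fun u c =>
      if !(PySem.Chars.isdigit c) then
        (if c ≠ '.' then PySem.Chars.replace u [c] [] else u)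
      else u) s
    = s.filter (fun x => !((!PySem.Chars.isdigit x && !(x == '.')) && decide (x ∈ cs))) := by
  induction cs generalizing s with
  | nil => simp
  | cons c cs ih =>
    simp only [List.foldl_cons]
    rw [ih]
    by_cases hd : PySem.Chars.isdigit c
    · simp only [hd]
      simp only [Bool.not_true, Bool.false_eq_true, if_false]
      apply List.filter_congr
      intro x hx
      by_cases hxc : x = c
      · subst hxc; simp [hd]
      · simp [hxc]
    · by_cases hc : c = '.'
      · subst hc
        simp only [hd, Bool.not_false, if_true, ne_eq, not_true_eq_false, if_false]
        apply List.filter_congr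
        intro x hx
        by_cases hxc : x = '.'
        · subst hxc; simp
        · simp [hxc]
      · simp only [hd, Bool.not_false, if_true, ne_eq, hc, not_false_eq_true, if_true]
        rw [replace_single, List.filter_filter]
        apply List.filter_congr
        intro x hx
        by_cases hxc : x = c
        · subst hxc; simp [hd, hc]
        · simp [hxc]

theorem loopA_eq_filter (cs : List Char) :
    cs.foldl (fun u c =>
      if !(PySem.Chars.isdigit c) then
        (if c ≠ '.' then PySem.Chars.replace u [c] [] else u)
      else u) cs
    = cs.filter (fun x => PySem.Chars.isdigit x || x == '.') := by
  rw [loopA_go]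
  apply List.filter_congr
  intro x hx
  simp [hx]

theorem first_occ_split (c : Char) (l : List Char) (h : c ∈ l) :
    ∃ p r, l = p ++ c :: r ∧ c ∉ p := by
  induction l with
  | nil => simp at h
  | cons x t ih =>
    by_cases hx : x = c
    · exact ⟨[], t, by simp [hx], by simp⟩
    · obtain ⟨p, r, rfl, hp⟩ := ih (by cases h with | head => exact absurd rfl hx | tail _ h => exact h)
      exact ⟨x :: p, r, rfl, by simp [hp]; intro h'; exact hx h'.symm⟩

theorem bfold_filter (cs : List Char) (st : List Char × Bool) :
    cs.foldl allowDigitOnlyBStep st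
      = (cs.filter (fun x => PySem.Chars.isdigit x || x == '.')).foldl allowDigitOnlyBStep st := by
  induction cs generalizing st with
  | nil => rfl
  | cons c cs ih =>
    by_cases hk : (PySem.Chars.isdigit c || c == '.') = true
    · simp only [List.filter_cons, hk, if_true, List.foldl_cons]
      exact ih _
    · have hd : PySem.Chars.isdigit c = false := by
        cases h' : PySem.Chars.isdigit c <;> simp [h'] at hk ⊢
      have hc : ¬ c = '.' := by
        intro h'; subst h'; simp [hd] at hk
      have hk' : (PySem.Chars.isdigit c || c == '.') = false := by simp [hd, hc]
      simp only [List.filter_cons, hk', Bool.false_eq_true, if_false, List.foldl_cons]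
      have : allowDigitOnlyBStep st c = st := by
        simp [allowDigitOnlyBStep, hd, hc]
      rw [this, ih]

theorem bfold_digits (l : List Char) (acc : List Char) (fl : Bool)
    (h : ∀ x ∈ l, PySem.Chars.isdigit x = true) :
    l.foldl allowDigitOnlyBStep (acc, fl) = (acc ++ l, fl) := by
  induction l generalizing acc with
  | nil => simp
  | cons x t ih =>
    have hx := h x (by simp)
    simp only [List.foldl_cons, allowDigitOnlyBStep, hx, if_true]
    rw [ih (acc ++ [x]) (fun y hy => h y (by simp [hy]))]
    simp

theorem bfold_flag_true (l : List Char) (acc : List Char)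
    (h : ∀ x ∈ l, (PySem.Chars.isdigit x || x == '.') = true) :
    l.foldl allowDigitOnlyBStep (acc, true) = (acc ++ l.filter (· ≠ '.'), true) := by
  induction l generalizing acc with
  | nil => simp
  | cons x t ih =>
    by_cases hd : PySem.Chars.isdigit x = true
    · have hne : ¬ x = '.' := by intro h'; subst h'; simp [PySem.Chars.isdigit] at hd
      simp only [List.foldl_cons, allowDigitOnlyBStep, hd, if_true]
      rw [ih (acc ++ [x]) (fun y hy => h y (by simp [hy]))]
      simp [hne]
    · have hx : x = '.' := by
        have := h x (by simp); simp [hd] at this; simpa using this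
      subst hx
      have hstep : allowDigitOnlyBStep (acc, true) '.' = (acc, true) := by
        simp [allowDigitOnlyBStep, hd]
      simp only [List.foldl_cons, hstep]
      rw [ih acc (fun y hy => h y (by simp [hy]))]
      simp

theorem core_eq (cs : List Char) : allowDigitOnlyACore cs = allowDigitOnlyBCore cs := by
  unfold allowDigitOnlyACore allowDigitOnlyBCore
  dsimp only
  rw [loopA_eq_filter, bfold_filter]
  set f := cs.filter (fun x => PySem.Chars.isdigit x || x == '.') with hf
  have hkeep : ∀ x ∈ f, (PySem.Chars.isdigit x || x == '.') = true := by
    intro x hx; exact (List.mem_filter.mp hx).2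
  by_cases hmem : '.' ∈ f
  · -- f = p ++ '.' :: r with '.' ∉ p, p all digits
    obtain ⟨p, r, hsplit, hp⟩ := first_occ_split '.' f hmem
    have hpd : ∀ x ∈ p, PySem.Chars.isdigit x = true := by
      intro x hx
      have := hkeep x (by rw [hsplit]; simp [hx])
      rcases Bool.or_eq_true_iff.mp this with h' | h'
      · exact h'
      · exact absurd (by simpa using h' : x = '.') (fun h'' => hp (h'' ▸ hx))
    have hr : ∀ x ∈ r, (PySem.Chars.isdigit x || x == '.') = true := by
      intro x hx; exact hkeep x (by rw [hsplit]; simp [hx])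
    rw [hsplit]
    -- B side value
    have hB : ((p ++ '.' :: r).foldl allowDigitOnlyBStep ([], false)).1
        = p ++ '.' :: r.filter (· ≠ '.') := by
      rw [List.foldl_append, bfold_digits p [] false hpd]
      simp only [List.nil_append]
      have hdot : allowDigitOnlyBStep (p, false) '.' = (p ++ ['.'], true) := by
        simp [allowDigitOnlyBStep, PySem.Chars.isdigit]
      simp only [List.foldl_cons, hdot]
      rw [bfold_flag_true r (p ++ ['.']) hr]
      simp
    rw [hB]
    have hfind : PySem.Chars.find (p ++ '.' :: r) ['.'] = (p.length : Int) :=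
      find_single_first '.' p r hp
    rw [hfind]
    -- the common abbreviation: q = '0'-prepended or p itself
    by_cases hpnil : p = []
    · subst hpnil
      simp only [List.length_nil, Nat.cast_zero, le_refl, if_true, List.nil_append]
      have hsw : PySem.Chars.startswith ('.' :: r.filter (· ≠ '.')) ['.'] = true := by
        rw [PySem.Chars.startswith_iff]; exact ⟨_, rfl⟩
      rw [if_pos hsw]
      -- A side with u2 = '0' :: '.' :: r
      have hcnt : PySem.Chars.count ('0' :: '.' :: r) ['.'] = 1 + r.count '.' := by
        rw [count_single]; simp; omega
      have hfind2 : PySem.Chars.find ('0' :: '.' :: r) ['.'] = (1 : Int) := by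
        have := find_single_first '.' ['0'] r (by simp)
        simpa using this
      by_cases hrc : 0 < r.count '.'
      · rw [if_pos (by rw [hcnt]; omega)]
        rw [hfind2]
        have h1 : PySem.Chars.slice ('0' :: '.' :: r) none (some (1 + 1)) = ['0', '.'] := by
          simp only [PySem.Chars.slice_eq_listSlice]
          rw [PySem.List.slice_to _ (b := 1 + 1) (by norm_num)]
          rfl
        have h2 : PySem.Chars.slice ('0' :: '.' :: r) (some 1) none = '.' :: r := by
          simp only [PySem.Chars.slice_eq_listSlice]
          rw [PySem.List.slice_from _ (a := 1) (by norm_num)]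
          rfl
        rw [h1, h2, replace_single]
        simp
      · rw [if_neg (by rw [hcnt]; omega)]
        have : r.filter (· ≠ '.') = r := by
          rw [List.filter_eq_self]
          intro x hx
          simp
          intro h'
          subst h'
          exact hrc (List.count_pos_iff.mpr hx)
        rw [this]
    · -- p ≠ []
      have hlp : ¬ ((p.length : Int) = 0) := by
        simp [List.length_eq_zero_iff, hpnil]
      rw [if_pos (Int.natCast_nonneg p.length), if_neg hlp]
      have hsw : PySem.Chars.startswith (p ++ '.' :: r.filter (· ≠ '.')) ['.'] = false := by
        rw [Bool.eq_false_iff]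
        intro h'
        rw [PySem.Chars.startswith_iff] at h'
        obtain ⟨x, t, rfl⟩ := List.exists_cons_of_ne_nil hpnil
        obtain ⟨u, hu⟩ := h'
        simp at hu
        exact hp (List.mem_cons.mpr (Or.inl hu.1))
      simp only [hsw, Bool.false_eq_true, if_false]
      have hcnt : PySem.Chars.count (p ++ '.' :: r) ['.'] = 1 + r.count '.' := by
        rw [count_single]
        simp [List.count_append, List.count_eq_zero_of_not_mem hp]
        omega
      by_cases hrc : 0 < r.count '.'
      · rw [if_pos (by rw [hcnt]; omega), hfind]
        have h1 : PySem.Chars.slice (p ++ '.' :: r) none (some ((p.length : Int) + 1)) = p ++ ['.'] := by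
          simp only [PySem.Chars.slice_eq_listSlice]
          rw [show ((p.length : Int) + 1) = ((p.length + 1 : Nat) : Int) by push_cast; ring,
            PySem.List.slice_to_natCast]
          rw [List.take_append]
          simp
        have h2 : PySem.Chars.slice (p ++ '.' :: r) (some (p.length : Int)) none = '.' :: r := by
          simp only [PySem.Chars.slice_eq_listSlice]
          rw [PySem.List.slice_from_natCast, List.drop_left]
        rw [h1, h2, replace_single]
        simp
      · rw [if_neg (by rw [hcnt]; omega)]
        have : r.filter (· ≠ '.') = r := by
          rw [List.filter_eq_self]
          intro x hx
          simp
          intro h'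
          subst h'
          exact hrc (List.count_pos_iff.mpr hx)
        rw [this]
  · -- no dot at all
    have hfd : PySem.Chars.find f ['.'] = -1 := find_single_not_mem '.' f hmem
    have hcnt : PySem.Chars.count f ['.'] = 0 := by
      rw [count_single]; exact List.count_eq_zero_of_not_mem hmem
    rw [hfd, if_neg (show ¬ ((0:Int) ≤ -1) by norm_num)]
    rw [if_neg (show ¬ (1 < PySem.Chars.count f ['.']) by rw [hcnt]; omega)]
    have hfd2 : ∀ x ∈ f, PySem.Chars.isdigit x = true := by
      intro x hx
      rcases Bool.or_eq_true_iff.mp (hkeep x hx) with h' | h'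
      · exact h'
      · exact absurd (by simpa using h' : x = '.') (fun h'' => hmem (h'' ▸ hx))
    rw [bfold_digits f [] false hfd2]
    have hsw : PySem.Chars.startswith ([] ++ f) ['.'] = false := by
      rw [Bool.eq_false_iff]
      intro h'
      rw [PySem.Chars.startswith_iff] at h'
      obtain ⟨u, hu⟩ := h'
      rw [List.nil_append] at hu
      exact hmem (by rw [← hu]; simp)
    simp only [List.nil_append] at hsw ⊢
    simp only [hsw, Bool.false_eq_true, if_false]

-- ===== VERDICT (by name: the statement is the Claim_ definition above) =====
theorem allow_digit_only_spec : Claim_equal_allow_digit_only := by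
  intro s _
  unfold Spec_allow_digit_only allow_digit_only allow_digit_only_alt
  rw [core_eq]
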